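-- pv_equiv track=rewrite | github.com/HJun0725/coding-practice | 프로그래머스/0/181881. 조건에 맞게 수열 변환하기 2/조건에 맞게 수열 변환하기 2.py | solution
-- ===== SOURCE A (Python) =====
-- def solution(arr):
--     answer = 0
--     while True:
--         beforeArr = [i for i in arr]
--
--         for i in range(len(arr)):
--             if arr[i] >= 50 and arr[i] % 2 == 0:
--                 arr[i] = arr[i]//2
--             if arr[i] < 50 and arr[i] % 2 != 0:
--                 arr[i] = arr[i] * 2 + 1
--
--         if arr == beforeArr:
--             break
--         else:
--             answer += 1
--
--
--     return answer
-- ===== SOURCE B (Python) =====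
-- def solution(arr):
--     # Simulate each element independently; the whole-array loop of A changes an
--     # element on every round until that element is a fixed point, so the number
--     # of rounds is the max of the per-element step counts.
--     def f(x):
--         if x >= 50 and x % 2 == 0:
--             x = x // 2
--         if x < 50 and x % 2 != 0:
--             x = x * 2 + 1
--         return x
--
--     best = 0
--     for x in arr:
--         c = 0
--         while f(x) != x:
--             x = f(x)
--             c += 1
--         best = max(best, c)
--     return best
-- ===== Notes on version B (the rewrite author's own statement) =====
-- stated objective: alternative
-- what changed: Instead of repeatedly copying and rescanning the whole array until a global fixed point, B simulates each element's trajectory independently and returns the maximum per-element step count.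
import Mathlib
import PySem

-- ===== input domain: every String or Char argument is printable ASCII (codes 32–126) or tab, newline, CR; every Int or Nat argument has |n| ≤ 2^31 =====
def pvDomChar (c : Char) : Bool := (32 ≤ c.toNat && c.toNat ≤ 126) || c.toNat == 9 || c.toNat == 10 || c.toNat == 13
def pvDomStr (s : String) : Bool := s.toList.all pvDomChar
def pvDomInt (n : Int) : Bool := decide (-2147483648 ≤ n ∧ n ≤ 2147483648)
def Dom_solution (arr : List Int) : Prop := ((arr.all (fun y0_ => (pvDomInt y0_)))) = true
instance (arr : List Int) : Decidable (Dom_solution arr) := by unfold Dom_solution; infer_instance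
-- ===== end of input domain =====

-- B replaces A's whole-array fixed-point loop (copy + rescan every round) by an independent
-- per-element simulation, returning the max per-element step count (objective: alternative).
-- Note: Python A mutates its argument list in place; the equivalence proved here is about the RETURN value only.

-- ===== PORT A =====
-- the body of A's inner `for i in range(len(arr))` loop for one element: two SEQUENTIAL ifs,
-- the second reading the value the first may have written (exact on all of Dom via PySem mod/floordiv)
def pvStep (x : Int) : Int :=
  let x1 : Int := if 50 ≤ x ∧ PySem.Int.mod x 2 = 0 then PySem.Int.floordiv x 2 else x
  if x1 < 50 ∧ PySem.Int.mod x1 2 ≠ 0 then x1 * 2 + 1 else x1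

-- A's `while True` loop: beforeArr = copy, elementwise update (each iteration of the for loop
-- touches only index i, hence `map pvStep`), stop when nothing changed, else answer += 1.
-- Fuel makes the loop total: inside Dom ∧ Pre it stabilizes in ≤ 33 rounds (proved below), so 64 never runs out.
def pvLoopA : Nat → List Int → Int → Int
  | 0, _, answer => answer
  | n + 1, arr, answer =>
    let arr' := arr.map pvStep
    if arr' = arr then answer else pvLoopA n arr' (answer + 1)

def solution (arr : List Int) : Int := pvLoopA 64 arr 0

-- ===== PORT B =====
-- Source B's inner `while f(x) != x: x = f(x); c += 1` with accumulator c (same 64-round fuel bound)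
def pvStepsB : Nat → Int → Int → Int
  | 0, _, c => c
  | n + 1, x, c => if pvStep x ≠ x then pvStepsB n (pvStep x) (c + 1) else c

-- Source B's outer loop: best = max(best, c) over the elements
def solution_alt (arr : List Int) : Int :=
  arr.foldl (fun best x => max best (pvStepsB 64 x 0)) 0

-- ===== PRECONDITION & SPEC =====
-- Pre_ excludes lists containing a NEGATIVE ODD element other than -1: there A's while-loop (and
-- B's) never terminates (x < 50 odd maps to the smaller negative odd 2*x+1), so A returns no value;
-- -1 is a fixed point of the update (2*(-1)+1 = -1) and stays admitted.
def Pre_solution (arr : List Int) : Prop := ∀ x ∈ arr, 0 ≤ x ∨ PySem.Int.mod x 2 = 0 ∨ x = -1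
instance (arr : List Int) : Decidable (Pre_solution arr) := by unfold Pre_solution; infer_instance
def pvWitness_solution : List Int := [1, 98, -4, 50, -1, 2147483648]

def Spec_solution (arr : List Int) (out : Int) : Prop := out = solution_alt arr
instance (arr : List Int) (out : Int) : Decidable (Spec_solution arr out) := by unfold Spec_solution; infer_instance

-- ===== CLAIM (what is proved, stated in full; the proofs are below) =====
def Claim_equal_solution : Prop := ∀ (arr : List Int), Dom_solution arr → Pre_solution arr → Spec_solution arr (solution arr)

-- ===== LEMMAS AND PROOFS =====

-- pvStep with Lean's % and / (divisor 2 is positive, so PySem mod/floordiv coincide with emod/ediv)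
lemma pvStep_def' (x : Int) : pvStep x =
    (let x1 : Int := if 50 ≤ x ∧ x % 2 = 0 then x / 2 else x
     if x1 < 50 ∧ x1 % 2 ≠ 0 then x1 * 2 + 1 else x1) := by
  simp only [pvStep, PySem.Int.mod_eq_emod_of_pos (by norm_num : (0:Int) < 2),
    PySem.Int.floordiv_eq_ediv_of_pos (by norm_num : (0:Int) < 2)]

lemma pvStep_fix_lt_even {x : Int} (h1 : x < 50) (h2 : x % 2 = 0) : pvStep x = x := by
  rw [pvStep_def']; simp only []; split_ifs with h3 h4 <;> omega

lemma pvStep_fix_ge_odd {x : Int} (h1 : 50 ≤ x) (h2 : x % 2 ≠ 0) : pvStep x = x := by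
  rw [pvStep_def']; simp only []; split_ifs with h3 h4 <;> omega

lemma pvStep_lt_odd {x : Int} (h1 : x < 50) (h2 : x % 2 ≠ 0) : pvStep x = x * 2 + 1 := by
  rw [pvStep_def']; simp only []; split_ifs with h3 h4 <;> omega

lemma pvStep_ge_even {x : Int} (h1 : 50 ≤ x) (h2 : x % 2 = 0) :
    pvStep x = if x / 2 < 50 ∧ x / 2 % 2 ≠ 0 then (x / 2) * 2 + 1 else x / 2 := by
  rw [pvStep_def']; simp only [if_pos (And.intro h1 h2)]

-- once an element is a fixed point it stays one
lemma G_of_fix {x : Int} (h : pvStep x = x) (n : Nat) :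
    pvStep (pvStep^[n] x) = pvStep^[n] x := by
  rw [Function.iterate_fixed h, h]

lemma G_succ {x : Int} {n : Nat} (h : pvStep (pvStep^[n] x) = pvStep^[n] x) :
    pvStep (pvStep^[n + 1] x) = pvStep^[n + 1] x := by
  rw [Function.iterate_succ_apply', h, h]

lemma G_mono {x : Int} {n m : Nat} (hnm : n ≤ m)
    (h : pvStep (pvStep^[n] x) = pvStep^[n] x) :
    pvStep (pvStep^[m] x) = pvStep^[m] x := by
  induction m with
  | zero => simpa [Nat.le_zero.mp hnm] using h
  | succ k ih =>
    rcases Nat.lt_or_ge n (k + 1) with hlt | hge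
    · exact G_succ (ih (Nat.lt_succ_iff.mp hlt))
    · have hk : n = k + 1 := le_antisymm hnm hge
      subst hk; exact h

lemma G_shift {x : Int} {n : Nat}
    (h : pvStep (pvStep^[n] (pvStep x)) = pvStep^[n] (pvStep x)) :
    pvStep (pvStep^[n + 1] x) = pvStep^[n + 1] x := by
  rwa [Function.iterate_succ_apply]

-- doubling phase: a nonnegative x < 50 stabilizes within k steps once (x+1)·2^k ≥ 51
lemma doubling (k : Nat) : ∀ x : Int, 0 ≤ x → x < 50 → 51 ≤ (x + 1) * 2 ^ k →
    pvStep (pvStep^[k] x) = pvStep^[k] x := by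
  induction k with
  | zero => intro x h0 h50 h51; simp at h51; omega
  | succ k ih =>
    intro x h0 h50 h51
    by_cases he : x % 2 = 0
    · exact G_of_fix (pvStep_fix_lt_even h50 he) _
    · have hs : pvStep x = x * 2 + 1 := pvStep_lt_odd h50 he
      by_cases hbig : 50 ≤ x * 2 + 1
      · have hfix : pvStep (x * 2 + 1) = x * 2 + 1 :=
          pvStep_fix_ge_odd hbig (by omega)
        exact G_shift (by rw [hs]; exact G_of_fix hfix _)
      · refine G_shift ?_
        rw [hs]
        refine ih _ (by omega) (by omega) ?_
        have hr : (x * 2 + 1 + 1) * 2 ^ k = (x + 1) * 2 ^ (k + 1) := by ring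
        omega

-- full stabilization: 0 ≤ x < 50·2^m stabilizes within m + 6 steps
lemma stabilize (m : Nat) : ∀ x : Int, 0 ≤ x → x < 50 * 2 ^ m →
    pvStep (pvStep^[m + 6] x) = pvStep^[m + 6] x := by
  induction m with
  | zero =>
    intro x h0 h50
    exact doubling 6 x h0 (by simpa using h50) (by nlinarith)
  | succ m ih =>
    intro x h0 hub
    by_cases hlt : x < 50 * 2 ^ m
    · exact G_succ (ih x h0 hlt)
    · push_neg at hlt
      have h2m : (1 : Int) ≤ 2 ^ m := one_le_pow₀ (by norm_num)
      have h50 : 50 ≤ x := le_trans (by nlinarith) hlt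
      by_cases he : x % 2 = 0
      · have hub' : x < 2 * (50 * 2 ^ m) := by
          have hp : (50 : Int) * 2 ^ (m + 1) = 2 * (50 * 2 ^ m) := by ring
          omega
        have hh0 : 0 ≤ x / 2 := by omega
        have hhub : x / 2 < 50 * 2 ^ m := by omega
        have hgoal : pvStep (pvStep^[m + 6] (pvStep x)) = pvStep^[m + 6] (pvStep x) := by
          rw [pvStep_ge_even h50 he]
          by_cases hodd : x / 2 < 50 ∧ x / 2 % 2 ≠ 0
          · -- halve then double back in the same round: result x+1, odd and ≥ 51, fixed
            rw [if_pos hodd, show (x / 2) * 2 + 1 = x + 1 by omega]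
            exact G_of_fix (pvStep_fix_ge_odd (by omega) (by omega)) _
          · rw [if_neg hodd]
            exact ih _ hh0 hhub
        have := G_shift hgoal
        rwa [show m + 6 + 1 = m + 1 + 6 by omega] at this
      · exact G_of_fix (pvStep_fix_ge_odd h50 he) _

-- every admitted element stabilizes within 64 steps
lemma stab64 {x : Int} (hdom : -2147483648 ≤ x ∧ x ≤ 2147483648)
    (hpre : 0 ≤ x ∨ PySem.Int.mod x 2 = 0 ∨ x = -1) :
    pvStep (pvStep^[64] x) = pvStep^[64] x := by
  by_cases h0 : 0 ≤ x
  · have hub : x < 50 * 2 ^ 26 := by omega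
    exact G_mono (by norm_num) (stabilize 26 x h0 hub)
  · rcases hpre with h | h | h
    · omega
    · have he : x % 2 = 0 := by
        rwa [PySem.Int.mod_eq_emod_of_pos (by norm_num : (0:Int) < 2)] at h
      exact G_of_fix (pvStep_fix_lt_even (by omega) he) _
    · subst h
      have hf : pvStep (-1 : Int) = -1 := by
        rw [pvStep_lt_odd (by norm_num) (by decide)]; norm_num
      exact G_of_fix hf _

-- proof-side pure step counter (Nat-valued)
def pvCnt : Nat → Int → Nat
  | 0, _ => 0
  | n + 1, x => if pvStep x = x then 0 else pvCnt n (pvStep x) + 1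

lemma pvCnt_fix {x : Int} (h : pvStep x = x) (n : Nat) : pvCnt n x = 0 := by
  cases n <;> simp [pvCnt, h]

lemma stepsB_eq_cnt (n : Nat) : ∀ (x : Int) (c : Int), pvStepsB n x c = c + pvCnt n x := by
  induction n with
  | zero => intro x c; simp [pvStepsB, pvCnt]
  | succ n ih =>
    intro x c
    by_cases h : pvStep x = x
    · simp [pvStepsB, pvCnt, h]
    · simp only [pvStepsB, pvCnt, if_neg h, if_pos h, ne_eq, ih]
      push_cast; ring

def pvMaxL (l : List Nat) : Nat := l.foldl max 0

lemma foldl_max_mem (l : List Nat) : ∀ a : Nat, l.foldl max a = a ∨ l.foldl max a ∈ l := by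
  induction l with
  | nil => intro a; left; rfl
  | cons x xs ih =>
    intro a
    rcases ih (max a x) with h | h
    · rcases Nat.le_total a x with hc | hc
      · right
        have hx : List.foldl max a (x :: xs) = x := by
          simp only [List.foldl]; rw [h, Nat.max_eq_right hc]
        rw [hx]; exact List.mem_cons_self
      · left
        simp only [List.foldl]; rw [h, Nat.max_eq_left hc]
    · right; exact List.mem_cons_of_mem _ (by simpa [List.foldl] using h)

lemma acc_le_foldl_max (l : List Nat) : ∀ a : Nat, a ≤ l.foldl max a := by
  induction l with
  | nil => intro a; exact le_refl a
  | cons y ys ih =>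
    intro a
    exact le_trans (le_max_left a y) (ih (max a y))

lemma le_foldl_max' (l : List Nat) : ∀ (a x : Nat), x ∈ l → x ≤ l.foldl max a := by
  induction l with
  | nil => intro a x hx; cases hx
  | cons y ys ih =>
    intro a x hx
    rcases List.mem_cons.mp hx with h | h
    · subst h
      exact le_trans (le_max_right a x) (acc_le_foldl_max ys (max a x))
    · exact ih (max a y) x h

lemma foldl_max_le {l : List Nat} {b : Nat} (h : ∀ x ∈ l, x ≤ b) :
    ∀ a, a ≤ b → l.foldl max a ≤ b := by
  induction l with
  | nil => intro a ha; exact ha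
  | cons y ys ih =>
    intro a ha
    exact ih (fun x hx => h x (List.mem_cons_of_mem _ hx)) _
      (max_le ha (h y List.mem_cons_self))

lemma le_pvMaxL {l : List Nat} {x : Nat} (hx : x ∈ l) : x ≤ pvMaxL l := le_foldl_max' l 0 x hx

lemma pvMaxL_le {l : List Nat} {b : Nat} (h : ∀ x ∈ l, x ≤ b) : pvMaxL l ≤ b :=
  foldl_max_le h 0 (Nat.zero_le _)

-- the key round identity: given one non-fixed element, one round of A drops the max counter by exactly 1
lemma maxCnt_round {arr : List Int} {n : Nat} {x0 : Int}
    (hx0 : x0 ∈ arr) (hne : pvStep x0 ≠ x0) :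
    pvMaxL (arr.map (pvCnt (n + 1))) = pvMaxL (arr.map (fun x => pvCnt n (pvStep x))) + 1 := by
  have h1 : pvCnt (n + 1) x0 = pvCnt n (pvStep x0) + 1 := by simp [pvCnt, hne]
  have hx0L : pvCnt (n + 1) x0 ≤ pvMaxL (arr.map (pvCnt (n + 1))) :=
    le_pvMaxL (List.mem_map_of_mem hx0)
  have hLle : pvMaxL (arr.map (pvCnt (n + 1))) ≤
      pvMaxL (arr.map (fun x => pvCnt n (pvStep x))) + 1 := by
    apply pvMaxL_le
    intro v hv
    obtain ⟨x, hx, rfl⟩ := List.mem_map.mp hv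
    by_cases h : pvStep x = x
    · simp [pvCnt, h]
    · have he : pvCnt (n + 1) x = pvCnt n (pvStep x) + 1 := by simp [pvCnt, h]
      have hm : pvCnt n (pvStep x) ≤ pvMaxL (arr.map (fun x => pvCnt n (pvStep x))) :=
        le_pvMaxL (List.mem_map_of_mem hx)
      omega
  have hRle : pvMaxL (arr.map (fun x => pvCnt n (pvStep x))) + 1 ≤
      pvMaxL (arr.map (pvCnt (n + 1))) := by
    rcases foldl_max_mem (arr.map (fun x => pvCnt n (pvStep x))) 0 with h | h
    · have hR0 : pvMaxL (arr.map (fun x => pvCnt n (pvStep x))) = 0 := h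
      omega
    · obtain ⟨x1, hx1, hval⟩ := List.mem_map.mp h
      have hRv : pvMaxL (arr.map (fun x => pvCnt n (pvStep x))) = pvCnt n (pvStep x1) :=
        hval.symm
      by_cases hfix : pvStep x1 = x1
      · have hz : pvCnt n (pvStep x1) = 0 := by rw [hfix]; exact pvCnt_fix hfix n
        omega
      · have h2 : pvCnt (n + 1) x1 = pvCnt n (pvStep x1) + 1 := by simp [pvCnt, hfix]
        have hm : pvCnt (n + 1) x1 ≤ pvMaxL (arr.map (pvCnt (n + 1))) :=
          le_pvMaxL (List.mem_map_of_mem hx1)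
        omega
  omega

lemma map_eq_self_fix {arr : List Int} (h : arr.map pvStep = arr) : ∀ x ∈ arr, pvStep x = x := by
  induction arr with
  | nil => intro x hx; cases hx
  | cons y ys ih =>
    simp only [List.map] at h
    injection h with h1 h2
    intro x hx
    rcases List.mem_cons.mp hx with hh | hh
    · subst hh; exact h1
    · exact ih h2 x hh

-- A's loop computes the max of the per-element counters
lemma loopA_eq_maxCnt (n : Nat) : ∀ (arr : List Int) (ans : Int),
    (∀ x ∈ arr, pvStep (pvStep^[n] x) = pvStep^[n] x) →
    pvLoopA n arr ans = ans + ↑(pvMaxL (arr.map (pvCnt n))) := by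
  induction n with
  | zero =>
    intro arr ans _
    have hz : pvMaxL (arr.map (pvCnt 0)) = 0 := by
      apply Nat.le_zero.mp
      apply pvMaxL_le
      intro v hv
      obtain ⟨x, _, rfl⟩ := List.mem_map.mp hv
      simp [pvCnt]
    simp [pvLoopA, hz]
  | succ n ih =>
    intro arr ans hstab
    by_cases h : arr.map pvStep = arr
    · have hfix := map_eq_self_fix h
      have hz : pvMaxL (arr.map (pvCnt (n + 1))) = 0 := by
        apply Nat.le_zero.mp
        apply pvMaxL_le
        intro v hv
        obtain ⟨x, hx, rfl⟩ := List.mem_map.mp hv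
        simp [pvCnt_fix (hfix x hx)]
      simp [pvLoopA, h, hz]
    · obtain ⟨x0, hx0, hne⟩ : ∃ x ∈ arr, pvStep x ≠ x := by
        by_contra hc
        push_neg at hc
        exact h ((List.map_congr_left hc).trans (List.map_id arr))
      have hstab' : ∀ y ∈ arr.map pvStep, pvStep (pvStep^[n] y) = pvStep^[n] y := by
        intro y hy
        obtain ⟨x, hx, rfl⟩ := List.mem_map.mp hy
        have hgx := hstab x hx
        rwa [Function.iterate_succ_apply] at hgx
      have hrec := ih (arr.map pvStep) (ans + 1) hstab'
      rw [List.map_map, Function.comp_def] at hrec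
      simp only [pvLoopA, if_neg h, hrec]
      rw [maxCnt_round hx0 hne]
      push_cast; ring

-- B computes the same max
lemma foldl_max_cast (arr : List Int) : ∀ a : Nat,
    arr.foldl (fun best x => max best (pvStepsB 64 x 0)) (a : Int) =
      ((arr.foldl (fun b x => max b (pvCnt 64 x)) a : Nat) : Int) := by
  induction arr with
  | nil => intro a; rfl
  | cons y ys ih =>
    intro a
    have hy : pvStepsB 64 y 0 = ((pvCnt 64 y : Nat) : Int) := by
      rw [stepsB_eq_cnt]; ring
    simp only [List.foldl, hy, ← Nat.cast_max, ih]

lemma alt_eq_maxCnt (arr : List Int) : solution_alt arr = ↑(pvMaxL (arr.map (pvCnt 64))) := by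
  have hc := foldl_max_cast arr 0
  rw [Nat.cast_zero] at hc
  unfold solution_alt pvMaxL
  rw [List.foldl_map]
  exact hc

-- ===== VERDICT (by name: the statement is the Claim_ definition above) =====
theorem solution_spec : Claim_equal_solution := by
  intro arr hdom hpre
  unfold Spec_solution
  have hstab : ∀ x ∈ arr, pvStep (pvStep^[64] x) = pvStep^[64] x := by
    intro x hx
    have hd : pvDomInt x = true := by
      have hall := (List.all_eq_true.mp hdom) x hx
      simpa using hall
    have hd' : -2147483648 ≤ x ∧ x ≤ 2147483648 := by
      simpa [pvDomInt] using hd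
    exact stab64 hd' (hpre x hx)
  rw [alt_eq_maxCnt]
  unfold solution
  simpa using loopA_eq_maxCnt 64 arr 0 hstab
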